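-- pv_equiv track=rewrite | github.com/mkern75/EverybodyCodes | TheKingdomOfAlgorithmia2024/q07.py | loop
-- ===== SOURCE A (Python) =====
-- from math import lcm
--
-- def loop_helper(n_steps, note, track, power_level_initial):
--     total = 0
--     power_level = power_level_initial
--     for i in range(n_steps):
--         c = track[i % len(track)]
--         if c == "+":
--             power_level += 1
--         elif c == "-":
--             power_level -= 1
--         else:
--             if note[i % len(note)] == "+":
--                 power_level += 1
--             elif note[i % len(note)] == "-":
--                 power_level -= 1
--         total += power_level
--     return total, power_level
--
-- def loop(n_loops, note, track):
--     k = lcm(len(note), len(track))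
--
--     power_level_initial = 10
--     total, power_level = loop_helper(k, note, track, power_level_initial)
--     power_level_delta = power_level - power_level_initial
--     total_delta = total - k * power_level_initial
--
--     total, power_level = 0, 10
--     q, r = divmod(n_loops, k // len(track))
--     for _ in range(q):
--         total += power_level * k + total_delta
--         power_level += power_level_delta
--     total += loop_helper(r * len(track), note, track, power_level)[0]
--
--     return total
-- ===== SOURCE B (Python) =====
-- from math import lcm
--
-- def loop(n_loops, note, track):
--     ln, lt = len(note), len(track)
--     k = lcm(ln, lt)
--     # per-step power deltas over one full lcm-cycle
--     cum = []
--     s = 0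
--     for i in range(k):
--         c = track[i % lt]
--         if c == "+":
--             s += 1
--         elif c == "-":
--             s -= 1
--         else:
--             nc = note[i % ln]
--             if nc == "+":
--                 s += 1
--             elif nc == "-":
--                 s -= 1
--         cum.append(s)
--     D = s             # net power change over one cycle
--     S = sum(cum)      # one cycle's total, counted from power 0
--     q, r = divmod(n_loops, k // lt)
--     blocks = max(q, 0)
--     m = r * lt
--     # arithmetic series over the `blocks` full cycles, then the remainder
--     total = blocks * (10 * k + S) + k * D * blocks * (blocks - 1) // 2
--     p = 10 + blocks * D
--     return total + m * p + sum(cum[:m])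
-- ===== Notes on version B (the rewrite author's own statement) =====
-- stated objective: faster
-- what changed: B replaces A's per-cycle accumulation loop over q full lcm-cycles by a closed-form arithmetic-series formula, and replaces the two loop_helper re-simulations by one prefix-sum table of the lcm-cycle built in a single pass.
import Mathlib
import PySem

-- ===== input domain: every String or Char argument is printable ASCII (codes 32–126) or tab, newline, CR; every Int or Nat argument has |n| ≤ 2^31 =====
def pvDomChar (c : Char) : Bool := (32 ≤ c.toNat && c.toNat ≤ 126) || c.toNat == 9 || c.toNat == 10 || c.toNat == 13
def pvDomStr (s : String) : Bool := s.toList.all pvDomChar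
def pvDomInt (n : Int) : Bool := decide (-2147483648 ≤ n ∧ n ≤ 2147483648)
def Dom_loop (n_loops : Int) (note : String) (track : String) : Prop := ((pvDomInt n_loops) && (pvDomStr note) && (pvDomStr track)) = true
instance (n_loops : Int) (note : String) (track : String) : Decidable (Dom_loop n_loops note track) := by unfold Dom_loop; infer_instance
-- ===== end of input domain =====

-- B: one prefix-sum pass over the lcm-cycle plus a closed-form arithmetic series for the q full cycles (replaces A's per-cycle loop); proved equal to A on nonempty note/track (A raises ZeroDivisionError otherwise).


-- ===== PORT A =====
-- loop_helper's for-loop; indexing track[i % len(track)] is exact via getD because the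
-- index is a Nat < length whenever the list is nonempty (Pre_); Python raises there otherwise.
def loopHelperGo (noteL trackL : List Char) : Nat → Nat → Int → Int → Int × Int
  | 0, _, total, power => (total, power)
  | f+1, i, total, power =>
    let c := trackL.getD (i % trackL.length) ' '
    let p1 := if c = '+' then power + 1
      else if c = '-' then power - 1
      else
        let nc := noteL.getD (i % noteL.length) ' '
        if nc = '+' then power + 1 else if nc = '-' then power - 1 else power
    loopHelperGo noteL trackL f (i+1) (total + p1) p1

-- loop_helper(n_steps, note, track, power_level_initial): range(n_steps) iterates n_steps.toNat times
def loopHelperA (n_steps : Int) (noteL trackL : List Char) (p0 : Int) : Int × Int :=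
  loopHelperGo noteL trackL n_steps.toNat 0 0 p0

-- Python divmod(a, b) ported as (floordiv a b, mod a b): exact for b ≠ 0 (b = 0, i.e. empty note/track, is excluded by Pre_: Python raises ZeroDivisionError)
def loop (n_loops : Int) (note : String) (track : String) : Int :=
  let noteL := note.toList
  let trackL := track.toList
  let k : Nat := Nat.lcm noteL.length trackL.length
  let res := loopHelperA (k : Int) noteL trackL 10
  let power_level_delta := res.2 - 10
  let total_delta := res.1 - (k : Int) * 10
  let q := PySem.Int.floordiv n_loops ((k / trackL.length : Nat) : Int)
  let r := PySem.Int.mod n_loops ((k / trackL.length : Nat) : Int)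
  let tp := (List.range q.toNat).foldl
      (fun (tp : Int × Int) _ => (tp.1 + tp.2 * (k : Int) + total_delta, tp.2 + power_level_delta))
      (0, 10)
  tp.1 + (loopHelperA (r * (trackL.length : Int)) noteL trackL tp.2).1

-- ===== PORT B =====
def loop_alt (n_loops : Int) (note : String) (track : String) : Int :=
  let noteL := note.toList
  let trackL := track.toList
  let ln := noteL.length
  let lt := trackL.length
  let k : Nat := Nat.lcm ln lt
  -- one pass: cumulative power levels (relative to the start) over one lcm-cycle
  let cum := (List.range k).foldl
      (fun (acc : List Int × Int) i =>
        let c := trackL.getD (i % lt) ' '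
        let s := acc.2
        let s' := if c = '+' then s + 1
          else if c = '-' then s - 1
          else
            let nc := noteL.getD (i % ln) ' '
            if nc = '+' then s + 1 else if nc = '-' then s - 1 else s
        (acc.1 ++ [s'], s')) ([], 0)
  let D := cum.2
  let S := cum.1.sum
  let q := PySem.Int.floordiv n_loops ((k / lt : Nat) : Int)
  let r := PySem.Int.mod n_loops ((k / lt : Nat) : Int)
  let blocks := max q 0
  let m := r * (lt : Int)
  let total := blocks * (10 * (k : Int) + S)
      + PySem.Int.floordiv ((k : Int) * D * blocks * (blocks - 1)) 2
  let p := 10 + blocks * D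
  total + m * p + (PySem.List.slice cum.1 none (some m)).sum

-- ===== PRECONDITION & SPEC =====
-- Pre_ excludes exactly the inputs with empty note or empty track, on which Python A raises ZeroDivisionError.
def Pre_loop (n_loops : Int) (note : String) (track : String) : Prop :=
  note.toList ≠ [] ∧ track.toList ≠ []
instance (n_loops : Int) (note : String) (track : String) : Decidable (Pre_loop n_loops note track) := by
  unfold Pre_loop; infer_instance

def pvWitness_loop : Int × String × String := (7, "+-x", "+-")

def Spec_loop (n_loops : Int) (note : String) (track : String) (out : Int) : Prop := out = loop_alt n_loops note track
instance (n_loops : Int) (note : String) (track : String) (out : Int) : Decidable (Spec_loop n_loops note track out) := by unfold Spec_loop; infer_instance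

-- ===== CLAIM (what is proved, stated in full; the proofs are below) =====
def Claim_equal_loop : Prop := ∀ (n_loops : Int) (note : String) (track : String), Dom_loop n_loops note track → Pre_loop n_loops note track → Spec_loop n_loops note track (loop n_loops note track)

-- ===== LEMMAS AND PROOFS =====

-- the per-step power delta at step i
def pvDelta (noteL trackL : List Char) (i : Nat) : Int :=
  if trackL.getD (i % trackL.length) ' ' = '+' then 1
  else if trackL.getD (i % trackL.length) ' ' = '-' then -1
  else if noteL.getD (i % noteL.length) ' ' = '+' then 1
  else if noteL.getD (i % noteL.length) ' ' = '-' then -1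
  else 0

-- prefix sums of deltas starting at offset i / at 0
def pvCsum (d : Nat → Int) (i n : Nat) : Int := ((List.range n).map (fun j => d (i + j))).sum
def pvCsum0 (d : Nat → Int) (n : Nat) : Int := ((List.range n).map d).sum

-- triangular numbers 0,0,1,3,6,…
def pvTri : Nat → Int
  | 0 => 0
  | b+1 => pvTri b + (b : Int)

theorem pvCsum_zero_eq (d : Nat → Int) (n : Nat) : pvCsum d 0 n = pvCsum0 d n := by
  simp [pvCsum, pvCsum0]

theorem pvCsum_one (d : Nat → Int) (i : Nat) : pvCsum d i 1 = d i := by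
  simp [pvCsum]

theorem pvCsum_succ_front (d : Nat → Int) (i n : Nat) :
    pvCsum d i (n+1) = d i + pvCsum d (i+1) n := by
  unfold pvCsum
  rw [List.range_succ_eq_map]
  simp only [List.map_cons, List.map_map, List.sum_cons, Nat.add_zero]
  congr 1
  apply congrArg
  apply List.map_congr_left
  intro j _
  simp only [Function.comp]
  congr 1
  omega

theorem pvCsum0_succ_back (d : Nat → Int) (n : Nat) :
    pvCsum0 d (n+1) = pvCsum0 d n + d n := by
  unfold pvCsum0
  rw [List.range_succ]
  simp

theorem pvStep_eq (noteL trackL : List Char) (i : Nat) (p : Int) :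
    (if trackL.getD (i % trackL.length) ' ' = '+' then p + 1
      else if trackL.getD (i % trackL.length) ' ' = '-' then p - 1
      else
        if noteL.getD (i % noteL.length) ' ' = '+' then p + 1
        else if noteL.getD (i % noteL.length) ' ' = '-' then p - 1 else p)
      = p + pvDelta noteL trackL i := by
  unfold pvDelta
  split_ifs <;> ring

theorem pv_sum_map_add (p : Int) (g : Nat → Int) (n : Nat) :
    ((List.range n).map (fun j => p + g j)).sum
      = (n : Int) * p + ((List.range n).map g).sum := by
  induction n with
  | zero => simp
  | succ n ih =>
    rw [List.range_succ]
    simp [ih]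
    ring

theorem pvHelperGo_eq (noteL trackL : List Char) :
    ∀ (f i : Nat) (t p : Int),
      loopHelperGo noteL trackL f i t p =
        (t + ((List.range f).map (fun j => p + pvCsum (pvDelta noteL trackL) i (j+1))).sum,
         p + pvCsum (pvDelta noteL trackL) i f) := by
  intro f
  induction f with
  | zero => intro i t p; simp [loopHelperGo, pvCsum]
  | succ f ih =>
    intro i t p
    show loopHelperGo noteL trackL (f+1) i t p = _
    rw [loopHelperGo]
    simp only []
    rw [pvStep_eq noteL trackL i p, ih]
    rw [Prod.mk.injEq]
    constructor
    case _ =>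
      -- first component
      rw [List.range_succ_eq_map]
      simp only [List.map_cons, List.map_map, List.sum_cons]
      rw [pvCsum_one]
      have hmap : (List.range f).map ((fun j => p + pvCsum (pvDelta noteL trackL) i (j+1)) ∘ Nat.succ)
          = (List.range f).map (fun j => p + pvDelta noteL trackL i + pvCsum (pvDelta noteL trackL) (i+1) (j+1)) := by
        apply List.map_congr_left
        intro j _
        simp only [Function.comp]
        rw [pvCsum_succ_front]
        ring
      rw [hmap]
      ring
    case _ =>
      rw [pvCsum_succ_front]
      ring

-- B's cum-building fold
theorem pvCumFold_eq (d : Nat → Int) (k : Nat) (l0 : List Int) (s0 : Int) :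
    (List.range k).foldl (fun (acc : List Int × Int) i => (acc.1 ++ [acc.2 + d i], acc.2 + d i)) (l0, s0)
      = (l0 ++ (List.range k).map (fun j => s0 + pvCsum0 d (j+1)), s0 + pvCsum0 d k) := by
  induction k with
  | zero => simp [pvCsum0]
  | succ k ih =>
    rw [List.range_succ, List.foldl_append, ih]
    simp only [List.foldl_cons, List.foldl_nil]
    rw [List.map_append, Prod.mk.injEq]
    constructor
    case _ =>
      simp [pvCsum0_succ_back, List.append_assoc]
      ring
    case _ =>
      rw [pvCsum0_succ_back]
      ring

-- A's q-loop closed form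
theorem pvQloop_eq (K td pd : Int) (b : Nat) :
    (List.range b).foldl (fun (tp : Int × Int) _ => (tp.1 + tp.2 * K + td, tp.2 + pd)) (0, 10)
      = ((b : Int) * (10 * K + td) + K * pd * pvTri b, 10 + (b : Int) * pd) := by
  induction b with
  | zero => simp [pvTri]
  | succ b ih =>
    rw [List.range_succ, List.foldl_append, ih]
    simp only [List.foldl_cons, List.foldl_nil, pvTri]
    rw [Prod.mk.injEq]
    constructor <;> (push_cast; ring)

theorem pvTri_two (b : Nat) : 2 * pvTri b = (b : Int) * ((b : Int) - 1) := by
  induction b with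
  | zero => simp [pvTri]
  | succ b ih =>
    rw [pvTri]
    push_cast
    linarith

theorem pvTri_floordiv (K D : Int) (b : Nat) :
    PySem.Int.floordiv (K * D * (b : Int) * ((b : Int) - 1)) 2 = K * D * pvTri b := by
  have h : K * D * (b : Int) * ((b : Int) - 1) = 2 * (K * D * pvTri b) := by
    have := pvTri_two b
    linear_combination (K * D) * this.symm
  rw [h, PySem.Int.floordiv_eq_ediv_of_pos (by norm_num)]
  exact Int.mul_ediv_cancel_left _ (by norm_num)

-- ===== VERDICT (by name: the statement is the Claim_ definition above) =====
theorem loop_spec : Claim_equal_loop := by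
  intro n note track _ hpre
  obtain ⟨hn, ht⟩ := hpre
  have hln : 0 < note.toList.length := List.length_pos_iff.mpr hn
  have hlt : 0 < track.toList.length := List.length_pos_iff.mpr ht
  unfold Spec_loop
  simp only [loop, loop_alt, loopHelperA, Int.toNat_natCast, pvStep_eq, pvHelperGo_eq,
    pvCsum_zero_eq, pvQloop_eq, pvCumFold_eq, zero_add, List.nil_append, pv_sum_map_add]
  set L := note.toList with hL
  set T := track.toList with hT
  set k := L.length.lcm T.length with hk_def
  set dv := k / T.length with hdv_def
  set q := PySem.Int.floordiv n (dv : Int) with hq_def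
  set r := PySem.Int.mod n (dv : Int) with hr_def
  have hk : 0 < k := Nat.lcm_pos hln hlt
  have hdvd : T.length ∣ k := Nat.dvd_lcm_right _ _
  have hdm : dv * T.length = k := Nat.div_mul_cancel hdvd
  have hdv : 0 < dv := Nat.div_pos (Nat.le_of_dvd hk hdvd) hlt
  have hdvi : (0 : Int) < (dv : Int) := by exact_mod_cast hdv
  have hr0 : (0 : Int) ≤ r := PySem.Int.mod_nonneg n hdvi
  have hrlt : r < (dv : Int) := PySem.Int.mod_lt n hdvi
  have hmax : max q 0 = ((q.toNat : Int)) := (Int.toNat_eq_max q).symm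
  rw [hmax]
  have hm : r * (T.length : Int) = ((r.toNat * T.length : Nat) : Int) := by
    rw [Nat.cast_mul, Int.toNat_of_nonneg hr0]
  rw [hm, Int.toNat_natCast, PySem.List.slice_to_natCast]
  set m' := r.toNat * T.length with hm'_def
  have hrdv : r.toNat < dv := by
    have h1 : (r.toNat : Int) < (dv : Int) := by rwa [Int.toNat_of_nonneg hr0]
    exact_mod_cast h1
  have hmk : m' ≤ k := by
    have h2 : m' ≤ (dv - 1) * T.length := Nat.mul_le_mul_right _ (by omega)
    rw [Nat.sub_one_mul, hdm] at h2
    omega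
  rw [← List.map_take, List.take_range, Nat.min_eq_left hmk, pvTri_floordiv]
  ring
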